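-- pv_equiv track=rewrite | github.com/shirshirzong/MIS3640 | quizzes/quiz3_relearn.py | get_middle
-- ===== SOURCE A (Python) =====
-- def get_middle(a, b):
--     '''
--     Given 2 lists, a and b, return a new list containing their middle elements.
--     '''
--     combined = [a, b]
--     output = []
--     for each in combined:
--         mid = len(each) //2
--         if len(each) % 2 == 0: #even number
--             output.extend(each[mid-1:mid+1])
--         else: #odd number
--             output.append(each[mid])
--
--     return output
-- ===== SOURCE B (Python) =====
-- def get_middle(a, b):
--     """Middle element(s) of each list found by two pointers converging from the ends."""
--     def mid(l):
--         i, j = 0, len(l) - 1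
--         while j - i > 1:
--             i += 1
--             j -= 1
--         return l[i:j + 1]
--     return mid(a) + mid(b)
-- ===== Notes on version B (the rewrite author's own statement) =====
-- stated objective: alternative
-- what changed: Replaced the loop over [a,b] with a parity branch and arithmetic midpoint computation by a two-pointer scan per list: indices converge from both ends until they meet, and the window between them is the answer, so no parity test or midpoint formula appears.
import Mathlib
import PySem

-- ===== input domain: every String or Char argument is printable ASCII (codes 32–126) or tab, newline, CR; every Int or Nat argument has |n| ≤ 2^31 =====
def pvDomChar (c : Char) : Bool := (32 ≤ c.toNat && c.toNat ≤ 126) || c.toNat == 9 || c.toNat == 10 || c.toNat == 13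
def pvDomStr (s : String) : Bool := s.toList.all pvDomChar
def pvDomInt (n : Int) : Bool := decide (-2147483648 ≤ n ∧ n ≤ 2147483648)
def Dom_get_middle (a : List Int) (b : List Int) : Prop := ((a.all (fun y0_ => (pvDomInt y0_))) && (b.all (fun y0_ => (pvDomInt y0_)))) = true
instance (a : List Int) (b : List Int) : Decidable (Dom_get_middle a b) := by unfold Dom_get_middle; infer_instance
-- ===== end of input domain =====

-- B replaces A's loop-with-parity-branch by a two-pointer scan per list: indices converge
-- from both ends until they meet and the remaining window is the answer (objective: alternative).

-- ===== PORT A =====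
-- loop body of 'for each in combined'; the 'none' arm of the match (IndexError) is
-- unreachable: for odd length, 0 ≤ mid < length, so each[mid] always exists.
def get_middle_step (output : List Int) (each : List Int) : List Int :=
  let mid : Int := PySem.Int.floordiv (each.length : Int) 2
  if PySem.Int.mod (each.length : Int) 2 = 0 then
    output ++ PySem.List.slice each (some (mid - 1)) (some (mid + 1))
  else
    match PySem.List.pyGet? each mid with
    | some v => output ++ [v]
    | none => output

def get_middle (a : List Int) (b : List Int) : List Int :=
  [a, b].foldl get_middle_step []

-- ===== PORT B =====
-- the 'while j - i > 1' loop of Source B's helper 'mid'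
def get_middle_loop (l : List Int) (i j : Int) : List Int :=
  if j - i > 1 then get_middle_loop l (i + 1) (j - 1)
  else PySem.List.slice l (some i) (some (j + 1))
termination_by (j - i).toNat
decreasing_by omega

def get_middle_mid (l : List Int) : List Int :=
  get_middle_loop l 0 ((l.length : Int) - 1)

def get_middle_alt (a : List Int) (b : List Int) : List Int :=
  get_middle_mid a ++ get_middle_mid b

-- ===== PRECONDITION & SPEC =====
def Spec_get_middle (a : List Int) (b : List Int) (out : List Int) : Prop := out = get_middle_alt a b
instance (a : List Int) (b : List Int) (out : List Int) : Decidable (Spec_get_middle a b out) := by unfold Spec_get_middle; infer_instance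

-- ===== CLAIM (what is proved, stated in full; the proofs are below) =====
def Claim_equal_get_middle : Prop := ∀ (a : List Int) (b : List Int), Dom_get_middle a b → Spec_get_middle a b (get_middle a b)

-- ===== LEMMAS AND PROOFS =====

-- proof-side characterisation of both programs' per-list middle: the symmetric slice
def pvMids (l : List Int) : List Int :=
  PySem.List.slice l (some (PySem.Int.floordiv ((l.length : Int) - 1) 2))
                     (some (PySem.Int.floordiv (l.length : Int) 2 + 1))

theorem get_middle_step_eq (out l : List Int) :
    get_middle_step out l = out ++ pvMids l := by
  have h2 : (0 : Int) < 2 := by norm_num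
  rcases eq_or_ne l [] with rfl | hl
  · simp [get_middle_step, pvMids, PySem.List.slice]
  · have hpos : 0 < l.length := List.length_pos_iff.mpr hl
    simp only [get_middle_step, pvMids,
      PySem.Int.floordiv_eq_ediv_of_pos h2, PySem.Int.mod_eq_emod_of_pos h2]
    rcases Nat.even_or_odd l.length with ⟨m, hm⟩ | ⟨m, hm⟩
    · have h1 : 1 ≤ m := by omega
      have hmod : ((l.length : Int)) % 2 = 0 := by omega
      have e1 : (l.length : Int) / 2 - 1 = (((m - 1 : Nat)) : Int) := by omega
      have e2 : (l.length : Int) / 2 + 1 = (((m + 1 : Nat)) : Int) := by omega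
      have e3 : ((l.length : Int) - 1) / 2 = (((m - 1 : Nat)) : Int) := by omega
      rw [if_pos hmod, e1, e2, e3, PySem.List.slice_natCast]
    · have hmod : ¬ ((l.length : Int)) % 2 = 0 := by omega
      have hmlt : m < l.length := by omega
      have e0 : (l.length : Int) / 2 = ((m : Nat) : Int) := by omega
      have e2 : (l.length : Int) / 2 + 1 = (((m + 1 : Nat)) : Int) := by omega
      have e3 : ((l.length : Int) - 1) / 2 = ((m : Nat) : Int) := by omega
      have htake : (l.drop m).take (m + 1 - m) = [l[m]'hmlt] := by
        simp only [Nat.add_sub_cancel_left]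
        exact List.take_one_drop_eq_of_lt_length hmlt
      rw [if_neg hmod, e3, e2, PySem.List.slice_natCast, htake, e0,
        PySem.List.pyGet?_natCast, List.getElem?_eq_getElem hmlt]

-- when the two pointers have met (j - i ≤ 1), the window is exactly the symmetric middle slice
theorem get_middle_loop_base (l : List Int) (i j : Int) (h : ¬ j - i > 1) (hi : 0 ≤ i)
    (hij : i + j = (l.length : Int) - 1) (hb : 2 * i < (l.length : Int) ∨ l = []) :
    PySem.List.slice l (some i) (some (j + 1)) = pvMids l := by
  have h2 : (0 : Int) < 2 := by norm_num
  rcases hb with hb | rfl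
  · have hji : 0 ≤ j - i := by omega
    simp only [pvMids, PySem.Int.floordiv_eq_ediv_of_pos h2]
    have e1 : ((l.length : Int) - 1) / 2 = i := by omega
    have e2 : (l.length : Int) / 2 + 1 = j + 1 := by omega
    rw [e1, e2]
  · simp [pvMids, PySem.List.slice]

theorem get_middle_loop_eq (l : List Int) (i j : Int) (hi : 0 ≤ i)
    (hij : i + j = (l.length : Int) - 1) (hb : 2 * i < (l.length : Int) ∨ l = []) :
    get_middle_loop l i j = pvMids l := by
  have main : ∀ (n : Nat) (i j : Int), (j - i).toNat ≤ n → 0 ≤ i →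
      i + j = (l.length : Int) - 1 → (2 * i < (l.length : Int) ∨ l = []) →
      get_middle_loop l i j = pvMids l := by
    intro n
    induction n with
    | zero =>
      intro i j hle hi hij hb
      have h : ¬ j - i > 1 := by omega
      rw [get_middle_loop, if_neg h]
      exact get_middle_loop_base l i j h hi hij hb
    | succ n ih =>
      intro i j hle hi hij hb
      by_cases h : j - i > 1
      · rw [get_middle_loop, if_pos h]
        have hb' : 2 * (i + 1) < (l.length : Int) ∨ l = [] := by
          left
          rcases hb with hb | rfl
          · omega
          · simp only [List.length_nil, Nat.cast_zero] at hij; omega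
        exact ih (i + 1) (j - 1) (by omega) (by omega) (by omega) hb'
      · rw [get_middle_loop, if_neg h]
        exact get_middle_loop_base l i j h hi hij hb
  exact main (j - i).toNat i j le_rfl hi hij hb

theorem get_middle_mid_eq (l : List Int) : get_middle_mid l = pvMids l := by
  rcases eq_or_ne l [] with rfl | hl
  · exact get_middle_loop_eq [] 0 (-1) le_rfl (by simp) (Or.inr rfl)
  · have hpos : 0 < l.length := List.length_pos_iff.mpr hl
    exact get_middle_loop_eq l 0 ((l.length : Int) - 1) le_rfl (by ring) (Or.inl (by omega))

-- ===== VERDICT (by name: the statement is the Claim_ definition above) =====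
theorem get_middle_spec : Claim_equal_get_middle := by
  intro a b _
  show get_middle a b = get_middle_alt a b
  simp [get_middle, get_middle_alt, List.foldl, get_middle_step_eq, get_middle_mid_eq]
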